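-- pv_equiv track=rewrite | github.com/OilProducts/sparkspawn | tests/integration/test_release_gate_traceability.py | _count_section_11_checkbox_items
-- ===== SOURCE A (Python) =====
-- def _count_section_11_checkbox_items(spec_text: str) -> int:
--     in_section_11 = False
--     count = 0
--
--     for line in spec_text.splitlines():
--         stripped = line.strip()
--         if stripped == "## 11. Definition of Done":
--             in_section_11 = True
--             continue
--         if in_section_11 and stripped.startswith("## ") and not stripped.startswith("## 11."):
--             break
--         if in_section_11 and stripped.startswith("- [ ] "):
--             count += 1
--
--     return count
-- ===== SOURCE B (Python) =====
-- def _count_section_11_checkbox_items(spec_text: str) -> int: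
--     # Two-phase: locate the section-11 header, slice out its block, then count.
--     lines = spec_text.splitlines()
--     header = "## 11. Definition of Done"
--     start = next((i + 1 for i, line in enumerate(lines) if line.strip() == header), None)
--     if start is None:
--         return 0
--     block = []
--     for line in lines[start:]:
--         s = line.strip()
--         if s.startswith("## ") and not s.startswith("## 11."):
--             break
--         block.append(line)
--     return sum(1 for line in block if line.strip().startswith("- [ ] "))
-- ===== Notes on version B (the rewrite author's own statement) =====
-- stated objective: simpler
-- what changed: Replaced the flag-driven single pass with three separate phases: find the header index with next/enumerate, slice and cut the block at the first foreign '## ' header, then count checkbox lines with sum over the block.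
import Mathlib
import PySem

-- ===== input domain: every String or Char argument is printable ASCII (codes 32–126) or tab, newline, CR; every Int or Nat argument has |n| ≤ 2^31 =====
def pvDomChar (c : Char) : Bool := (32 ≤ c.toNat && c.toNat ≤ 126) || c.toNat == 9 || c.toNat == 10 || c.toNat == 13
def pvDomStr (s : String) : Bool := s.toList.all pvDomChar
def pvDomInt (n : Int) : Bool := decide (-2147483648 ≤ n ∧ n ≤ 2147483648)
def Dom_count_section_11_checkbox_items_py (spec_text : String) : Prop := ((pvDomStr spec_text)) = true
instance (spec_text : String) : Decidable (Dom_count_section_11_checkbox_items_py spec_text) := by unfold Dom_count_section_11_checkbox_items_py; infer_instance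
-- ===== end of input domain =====

-- B replaces A's flag-driven single pass by three phases (find header index, cut block at next foreign header, count): simpler decomposition, same cost.


-- ===== PORT A =====
-- A's single flag-driven loop with break, state = (in_section_11, count)
def pvLoopA : List String → Bool → Int → Int
  | [], _, count => count
  | line :: rest, ins, count =>
    let stripped := PySem.Str.strip line
    if stripped == "## 11. Definition of Done" then pvLoopA rest true count
    else if ins && PySem.Str.startswith stripped "## " && !(PySem.Str.startswith stripped "## 11.") then count
    else if ins && PySem.Str.startswith stripped "- [ ] " then pvLoopA rest ins (count + 1)
    else pvLoopA rest ins count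

def count_section_11_checkbox_items_py (spec_text : String) : Int :=
  pvLoopA (PySem.Str.splitlines spec_text) false 0

-- ===== PORT B =====
-- a line at which B's block-collecting loop breaks (a foreign '## ' header)
def pvIsBreak (line : String) : Bool :=
  PySem.Str.startswith (PySem.Str.strip line) "## " &&
    !(PySem.Str.startswith (PySem.Str.strip line) "## 11.")

-- a checkbox line
def pvIsBox (line : String) : Bool := PySem.Str.startswith (PySem.Str.strip line) "- [ ] "

def count_section_11_checkbox_items_py_alt (spec_text : String) : Int :=
  let lines := PySem.Str.splitlines spec_text
  match lines.findIdx? (fun l => PySem.Str.strip l == "## 11. Definition of Done") with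
  | none => 0
  | some i =>
      -- the loop appending lines until the first break line = takeWhile
      let block := (lines.drop (i + 1)).takeWhile (fun l => !pvIsBreak l)
      ((block.countP pvIsBox : Nat) : Int)

-- ===== PRECONDITION & SPEC =====
def Spec_count_section_11_checkbox_items_py (spec_text : String) (out : Int) : Prop := out = count_section_11_checkbox_items_py_alt spec_text
instance (spec_text : String) (out : Int) : Decidable (Spec_count_section_11_checkbox_items_py spec_text out) := by unfold Spec_count_section_11_checkbox_items_py; infer_instance

-- ===== CLAIM (what is proved, stated in full; the proofs are below) =====
def Claim_equal_count_section_11_checkbox_items_py : Prop := ∀ (spec_text : String), Dom_count_section_11_checkbox_items_py spec_text → Spec_count_section_11_checkbox_items_py spec_text (count_section_11_checkbox_items_py spec_text)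

-- ===== LEMMAS AND PROOFS =====

-- the in-section phase of A equals counting checkboxes over the takeWhile block
lemma loopA_true (ls : List String) : ∀ (c : Int),
    pvLoopA ls true c = c + ((ls.takeWhile (fun l => !pvIsBreak l)).countP pvIsBox : Nat) := by
  induction ls with
  | nil => intro c; simp [pvLoopA]
  | cons l rest ih =>
    intro c
    rw [List.takeWhile_cons]
    show (if (PySem.Str.strip l == "## 11. Definition of Done") = true then pvLoopA rest true c
      else if (true && PySem.Str.startswith (PySem.Str.strip l) "## " &&
          !PySem.Str.startswith (PySem.Str.strip l) "## 11.") = true then c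
      else if (true && PySem.Str.startswith (PySem.Str.strip l) "- [ ] ") = true then
        pvLoopA rest true (c + 1)
      else pvLoopA rest true c) = _
    by_cases hh : PySem.Str.strip l = "## 11. Definition of Done"
    · have hbrk : pvIsBreak l = false := by rw [pvIsBreak, hh]; decide
      have hbox : pvIsBox l = false := by rw [pvIsBox, hh]; decide
      rw [if_pos (by simp [hh]), hbrk]
      simp [hbox, ih]
    · rw [if_neg (by simpa using hh)]
      by_cases hb : pvIsBreak l = true
      · rw [if_pos (by simpa [pvIsBreak] using hb), hb]
        simp
      · have hb' : pvIsBreak l = false := by simpa using hb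
        rw [if_neg (by simpa [pvIsBreak] using hb'), hb']
        by_cases hx : pvIsBox l = true
        · rw [if_pos (by simpa [pvIsBox] using hx)]
          simp only [Bool.not_false, List.countP_cons, hx, if_pos]
          rw [ih]
          push_cast
          ring
        · have hx' : pvIsBox l = false := by simpa using hx
          rw [if_neg (by simpa [pvIsBox] using hx')]
          simp [hx', ih]

-- the pre-section phase: A on any line list equals B's find-then-count value
lemma loopA_false (ls : List String) :
    pvLoopA ls false 0 =
      match ls.findIdx? (fun l => PySem.Str.strip l == "## 11. Definition of Done") with
      | none => 0
      | some i => (((ls.drop (i + 1)).takeWhile (fun l => !pvIsBreak l)).countP pvIsBox : Nat) := by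
  induction ls with
  | nil => simp [pvLoopA]
  | cons l rest ih =>
    by_cases hh : PySem.Str.strip l = "## 11. Definition of Done"
    · simp [pvLoopA, hh, List.findIdx?_cons, loopA_true]
    · have hne : (PySem.Str.strip l == "## 11. Definition of Done") = false := by
        simpa using hh
      show (if (PySem.Str.strip l == "## 11. Definition of Done") = true then pvLoopA rest true 0
        else if (false && PySem.Str.startswith (PySem.Str.strip l) "## " &&
            !PySem.Str.startswith (PySem.Str.strip l) "## 11.") = true then 0
        else if (false && PySem.Str.startswith (PySem.Str.strip l) "- [ ] ") = true then
          pvLoopA rest false (0 + 1)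
        else pvLoopA rest false 0) = _
      rw [if_neg (by simpa using hh), if_neg (by simp), if_neg (by simp)]
      rw [ih, List.findIdx?_cons, hne]
      cases hf : rest.findIdx? (fun l => PySem.Str.strip l == "## 11. Definition of Done") with
      | none => simp
      | some i => simp [List.drop_succ_cons]

-- ===== VERDICT (by name: the statement is the Claim_ definition above) =====
theorem count_section_11_checkbox_items_py_spec : Claim_equal_count_section_11_checkbox_items_py := by
  intro s _
  unfold Spec_count_section_11_checkbox_items_py
  unfold count_section_11_checkbox_items_py count_section_11_checkbox_items_py_alt
  exact loopA_false _
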